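-- pv_equiv track=rewrite | github.com/Ascendral/KlomboAGI | klomboagi/reasoning/arc_solver.py | _try_quarter_grid
-- ===== SOURCE A (Python) =====
-- def _try_quarter_grid(train, test_input):
--     """Output is one quarter of the input."""
--     for ex in train:
--         ir, ic = len(ex["input"]), len(ex["input"][0])
--         or_, oc = len(ex["output"]), len(ex["output"][0])
--         if or_ != ir // 2 or oc != ic // 2:
--             return None
--
--     def tl(g):
--         hr, hc = len(g)//2, len(g[0])//2
--         return [row[:hc] for row in g[:hr]]
--     def tr(g):
--         hr, hc = len(g)//2, len(g[0])//2
--         return [row[hc:] for row in g[:hr]]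
--     def bl(g):
--         hr, hc = len(g)//2, len(g[0])//2
--         return [row[:hc] for row in g[hr:]]
--     def br(g):
--         hr, hc = len(g)//2, len(g[0])//2
--         return [row[hc:] for row in g[hr:]]
--
--     for fn in [tl, tr, bl, br]:
--         if all(fn(ex["input"]) == ex["output"] for ex in train):
--             return fn(test_input)
--     return None
-- ===== SOURCE B (Python) =====
-- def _try_quarter_grid(train, test_input):
--     """Output is one quarter of the input."""
--     def _quarter(g, q):
--         hr, hc = len(g) // 2, len(g[0]) // 2
--         rows = g[hr:] if q & 2 else g[:hr]
--         return [r[hc:] if q & 1 else r[:hc] for r in rows]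
--
--     mask = 0b1111  # bit q set <=> quarter q still viable (0=tl, 1=tr, 2=bl, 3=br)
--     for ex in train:
--         ir, ic = len(ex["input"]), len(ex["input"][0])
--         or_, oc = len(ex["output"]), len(ex["output"][0])
--         if or_ != ir // 2 or oc != ic // 2:
--             return None
--         mask &= sum(1 << q for q in range(4) if _quarter(ex["input"], q) == ex["output"])
--     if mask:
--         return _quarter(test_input, next(q for q in range(4) if mask >> q & 1))
--     return None
-- ===== Notes on version B (the rewrite author's own statement) =====
-- stated objective: alternative
-- what changed: A runs a separate dimension-guard pass and then four sequential all()-scans over train, one per hard-coded quarter closure (tl/tr/bl/br), applying the first that matches; B fuses everything into ONE pass over train that maintains a 4-bit integer viability mask (ANDing in each example's per-quarter match bits alongside the dimension check), then applies the quarter of the mask's lowest set bit (preserving the canonical tl,tr,bl,br tie-break) to test_input.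
import Mathlib
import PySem

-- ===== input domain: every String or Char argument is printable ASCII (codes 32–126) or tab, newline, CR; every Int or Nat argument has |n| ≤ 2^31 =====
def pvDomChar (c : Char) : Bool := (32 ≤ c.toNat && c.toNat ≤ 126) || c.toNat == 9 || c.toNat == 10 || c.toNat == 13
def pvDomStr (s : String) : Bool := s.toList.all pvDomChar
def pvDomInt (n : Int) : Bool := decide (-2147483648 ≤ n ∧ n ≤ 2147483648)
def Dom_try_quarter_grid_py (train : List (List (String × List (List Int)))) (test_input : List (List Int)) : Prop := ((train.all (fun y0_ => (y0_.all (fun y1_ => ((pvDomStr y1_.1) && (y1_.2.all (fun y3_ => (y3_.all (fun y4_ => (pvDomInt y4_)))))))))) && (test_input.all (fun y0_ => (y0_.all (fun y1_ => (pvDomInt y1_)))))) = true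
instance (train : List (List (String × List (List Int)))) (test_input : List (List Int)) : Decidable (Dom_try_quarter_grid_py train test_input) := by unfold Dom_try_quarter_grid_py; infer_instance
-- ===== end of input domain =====

-- B fuses A's two stages (a separate dimension-guard pass, then four sequential all()
-- scans with hard-coded tl/tr/bl/br closures) into ONE pass over train maintaining a
-- 4-bit viability mask, then applies the lowest surviving bit's quarter to test_input
-- (alternative decomposition; same asymptotic cost).


-- ===== PORT A =====
-- ex["k"] : Python dict lookup; the assoc list is the dict in insertion order,
-- Dict.ofList reproduces dict(list) (later duplicates overwrite). none = KeyError (outside Pre_).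
def pvGetA (ex : List (String × List (List Int))) (k : String) : Option (List (List Int)) :=
  (PySem.Dict.ofList ex).get? k

-- tl/tr/bl/br of A; g[0] raises IndexError on an empty grid (none, outside Pre_);
-- hr,hc ≥ 0 so Python's slices g[:hr]/g[hr:]/row[:hc]/row[hc:] are exactly take/drop.
def pyTL (g : List (List Int)) : Option (List (List Int)) :=
  match g.head? with
  | none => none
  | some r0 => some (((g.take (g.length / 2)).map (fun row => row.take (r0.length / 2))))
def pyTR (g : List (List Int)) : Option (List (List Int)) :=
  match g.head? with
  | none => none
  | some r0 => some (((g.take (g.length / 2)).map (fun row => row.drop (r0.length / 2))))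
def pyBL (g : List (List Int)) : Option (List (List Int)) :=
  match g.head? with
  | none => none
  | some r0 => some (((g.drop (g.length / 2)).map (fun row => row.take (r0.length / 2))))
def pyBR (g : List (List Int)) : Option (List (List Int)) :=
  match g.head? with
  | none => none
  | some r0 => some (((g.drop (g.length / 2)).map (fun row => row.drop (r0.length / 2))))

-- A's first loop: false = some example returned None early (or a raise, outside Pre_)
def guardA : List (List (String × List (List Int))) → Bool
  | [] => true
  | ex :: rest =>
    match pvGetA ex "input", pvGetA ex "output" with
    | some inp, some out =>
      match inp.head?, out.head? with
      | some i0, some o0 =>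
        if out.length ≠ inp.length / 2 ∨ o0.length ≠ i0.length / 2 then false
        else guardA rest
      | _, _ => false
    | _, _ => false

-- all(fn(ex["input"]) == ex["output"] for ex in train)
def allA (fn : List (List Int) → Option (List (List Int))) :
    List (List (String × List (List Int))) → Bool
  | [] => true
  | ex :: rest =>
    match pvGetA ex "input", pvGetA ex "output" with
    | some inp, some out => fn inp == some out && allA fn rest
    | _, _ => false

def try_quarter_grid_py (train : List (List (String × List (List Int)))) (test_input : List (List Int)) : Option (List (List Int)) :=
  if guardA train then
    if allA pyTL train then pyTL test_input
    else if allA pyTR train then pyTR test_input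
    else if allA pyBL train then pyBL test_input
    else if allA pyBR train then pyBR test_input
    else none
  else none

-- ===== PORT B =====
def pvGetB (ex : List (String × List (List Int))) (k : String) : Option (List (List Int)) :=
  (PySem.Dict.ofList ex).get? k

-- _quarter(g, q): quarter q of grid g (bit 1 = bottom, bit 0 = right); none = IndexError on g[0]
def quarterB (g : List (List Int)) (q : Nat) : Option (List (List Int)) :=
  match g.head? with
  | none => none
  | some r0 =>
    let hr := g.length / 2
    let hc := r0.length / 2
    let rows := if q &&& 2 ≠ 0 then g.drop hr else g.take hr
    some (rows.map (fun r => if q &&& 1 ≠ 0 then r.drop hc else r.take hc))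

-- sum(1 << q for q in range(4) if _quarter(inp, q) == out)
def exMask (inp : List (List Int)) (out : List (List Int)) : Nat :=
  (List.range 4).foldl (fun s q => if quarterB inp q == some out then s + (1 <<< q) else s) 0

-- B's single fused loop over train: dimension guard + `mask &= ...`; none = early `return None`
def loopB (mask : Nat) : List (List (String × List (List Int))) → Option Nat
  | [] => some mask
  | ex :: rest =>
    match pvGetB ex "input", pvGetB ex "output" with
    | some inp, some out =>
      match inp.head?, out.head? with
      | some i0, some o0 =>
        if out.length ≠ inp.length / 2 ∨ o0.length ≠ i0.length / 2 then none
        else loopB (mask &&& exMask inp out) rest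
      | _, _ => none
    | _, _ => none

def try_quarter_grid_py_alt (train : List (List (String × List (List Int)))) (test_input : List (List Int)) : Option (List (List Int)) :=
  match loopB 15 train with
  | none => none
  | some mask =>
    if mask ≠ 0 then
      -- next(q for q in range(4) if mask >> q & 1)
      match (List.range 4).find? (fun q => mask >>> q &&& 1 == 1) with
      | some q => quarterB test_input q
      | none => none   -- unreachable: mask ≠ 0 has a set bit among 0..3
    else none

-- ===== PRECONDITION & SPEC =====
-- wfB: the example has "input"/"output" keys and both grids are nonempty (all four len() calls succeed)
def wfB (ex : List (String × List (List Int))) : Bool :=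
  match (PySem.Dict.ofList ex).get? "input", (PySem.Dict.ofList ex).get? "output" with
  | some inp, some out => !inp.isEmpty && !out.isEmpty
  | _, _ => false

-- dimsFitB: well-formed AND the output has exactly half-size dimensions
def dimsFitB (ex : List (String × List (List Int))) : Bool :=
  match (PySem.Dict.ofList ex).get? "input", (PySem.Dict.ofList ex).get? "output" with
  | some inp, some out =>
    match inp.head?, out.head? with
    | some i0, some o0 => decide (out.length = inp.length / 2) && decide (o0.length = i0.length / 2)
    | _, _ => false
  | _, _ => false

-- spec-level quarter of a (nonempty) grid and "some quarter maps every train input to its output"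
def sQuarter (q : Nat) (g : List (List Int)) : List (List Int) :=
  ((if q &&& 2 ≠ 0 then g.drop (g.length / 2) else g.take (g.length / 2)).map
    (fun r => if q &&& 1 ≠ 0 then r.drop ((g.headD []).length / 2) else r.take ((g.headD []).length / 2)))

def sWin (train : List (List (String × List (List Int)))) : Bool :=
  (List.range 4).any (fun q => train.all (fun ex =>
    (PySem.Dict.ofList ex).get? "output" == ((PySem.Dict.ofList ex).get? "input").map (sQuarter q)))

-- Pre_ excludes exactly the inputs on which Python A raises: a malformed example (missing
-- key or empty grid) at the first position whose dimensions don't fit (the loop stops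
-- there, so later examples are never touched), or an empty test_input handed to a winning
-- quarter extractor (IndexError on test_input[0]).
def Pre_try_quarter_grid_py (train : List (List (String × List (List Int)))) (test_input : List (List Int)) : Prop :=
  ((train.dropWhile dimsFitB).head?.all wfB &&
    (!test_input.isEmpty || !(train.all dimsFitB && sWin train))) = true
instance (train : List (List (String × List (List Int)))) (test_input : List (List Int)) : Decidable (Pre_try_quarter_grid_py train test_input) := by unfold Pre_try_quarter_grid_py; infer_instance

def pvWitness_try_quarter_grid_py : (List (List (String × List (List Int)))) × List (List Int) :=
  ([[("input", [[1, 2], [3, 4]]), ("output", [[1]])]], [[5, 6], [7, 8]])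

def Spec_try_quarter_grid_py (train : List (List (String × List (List Int)))) (test_input : List (List Int)) (out : Option (List (List Int))) : Prop := out = try_quarter_grid_py_alt train test_input
instance (train : List (List (String × List (List Int)))) (test_input : List (List Int)) (out : Option (List (List Int))) : Decidable (Spec_try_quarter_grid_py train test_input out) := by unfold Spec_try_quarter_grid_py; infer_instance

-- ===== CLAIM (what is proved, stated in full; the proofs are below) =====
def Claim_equal_try_quarter_grid_py : Prop := ∀ (train : List (List (String × List (List Int)))) (test_input : List (List Int)), Dom_try_quarter_grid_py train test_input → Pre_try_quarter_grid_py train test_input → Spec_try_quarter_grid_py train test_input (try_quarter_grid_py train test_input)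

-- ===== LEMMAS AND PROOFS =====
def natOfBits (a b c d : Bool) : Nat :=
  (cond a 1 0) + (cond b 2 0) + (cond c 4 0) + (cond d 8 0)

theorem land_natOfBits : ∀ a b c d e f g h : Bool,
    natOfBits a b c d &&& natOfBits e f g h = natOfBits (a && e) (b && f) (c && g) (d && h) := by
  decide

theorem land_assoc_natOfBits : ∀ a b c d e f g h i j k l : Bool,
    natOfBits a b c d &&& natOfBits (e && i) (f && j) (g && k) (h && l) =
    (natOfBits a b c d &&& natOfBits e f g h) &&& natOfBits i j k l := by
  decide

theorem quarterB_zero : (fun g => quarterB g 0) = pyTL := by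
  funext g; cases g <;> simp [quarterB, pyTL]
theorem quarterB_one : (fun g => quarterB g 1) = pyTR := by
  funext g; cases g <;> simp [quarterB, pyTR]
theorem quarterB_two : (fun g => quarterB g 2) = pyBL := by
  funext g; cases g <;> simp [quarterB, pyBL]
theorem quarterB_three : (fun g => quarterB g 3) = pyBR := by
  funext g; cases g <;> simp [quarterB, pyBR]

theorem exMask_eq (inp out : List (List Int)) :
    exMask inp out = natOfBits (quarterB inp 0 == some out) (quarterB inp 1 == some out)
      (quarterB inp 2 == some out) (quarterB inp 3 == some out) := by
  show List.foldl _ 0 [0, 1, 2, 3] = _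
  simp only [List.foldl]
  cases h0 : (quarterB inp 0 == some out) <;>
  cases h1 : (quarterB inp 1 == some out) <;>
  cases h2 : (quarterB inp 2 == some out) <;>
  cases h3 : (quarterB inp 3 == some out) <;>
    simp [natOfBits]

def bitsA (l : List (List (String × List (List Int)))) : Nat :=
  natOfBits (allA (fun g => quarterB g 0) l) (allA (fun g => quarterB g 1) l)
    (allA (fun g => quarterB g 2) l) (allA (fun g => quarterB g 3) l)

theorem loopB_eq (l : List (List (String × List (List Int)))) :
    ∀ a b c d : Bool, loopB (natOfBits a b c d) l =
      if guardA l then some (natOfBits a b c d &&& bitsA l) else none := by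
  induction l with
  | nil =>
    intro a b c d
    simp only [loopB, guardA, if_true, bitsA, allA]
    cases a <;> cases b <;> cases c <;> cases d <;> rfl
  | cons ex rest ih =>
    intro a b c d
    cases hin : (PySem.Dict.ofList ex).get? "input" with
    | none => simp [loopB, guardA, pvGetB, pvGetA, hin]
    | some inp =>
      cases hout : (PySem.Dict.ofList ex).get? "output" with
      | none => simp [loopB, guardA, pvGetB, pvGetA, hin, hout]
      | some out =>
        cases hih : inp.head? with
        | none => simp [loopB, guardA, pvGetB, pvGetA, hin, hout, hih]
        | some i0 =>
          cases hoh : out.head? with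
          | none => simp [loopB, guardA, pvGetB, pvGetA, hin, hout, hih, hoh]
          | some o0 =>
            by_cases hdim : out.length ≠ inp.length / 2 ∨ o0.length ≠ i0.length / 2
            · simp [loopB, guardA, pvGetB, pvGetA, hin, hout, hih, hoh, hdim]
            · have hb : bitsA (ex :: rest) =
                  natOfBits ((quarterB inp 0 == some out) && allA (fun g => quarterB g 0) rest)
                    ((quarterB inp 1 == some out) && allA (fun g => quarterB g 1) rest)
                    ((quarterB inp 2 == some out) && allA (fun g => quarterB g 2) rest)
                    ((quarterB inp 3 == some out) && allA (fun g => quarterB g 3) rest) := by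
                simp [bitsA, allA, pvGetA, hin, hout]
              simp only [loopB, guardA, pvGetB, pvGetA, hin, hout, hih, hoh, if_neg hdim]
              rw [exMask_eq, land_natOfBits, ih, hb, land_assoc_natOfBits, ← land_natOfBits]
              simp only [bitsA]
  -- end loopB_eq

-- ===== VERDICT (by name: the statement is the Claim_ definition above) =====
theorem try_quarter_grid_py_spec : Claim_equal_try_quarter_grid_py := by
  intro train t _ _
  show try_quarter_grid_py train t = try_quarter_grid_py_alt train t
  unfold try_quarter_grid_py try_quarter_grid_py_alt
  rw [show (15 : Nat) = natOfBits true true true true from rfl, loopB_eq]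
  cases hg : guardA train
  · rfl
  · simp only [if_true]
    unfold bitsA
    rw [quarterB_zero, quarterB_one, quarterB_two, quarterB_three]
    cases h1 : allA pyTL train <;> cases h2 : allA pyTR train <;>
      cases h3 : allA pyBL train <;> cases h4 : allA pyBR train <;>
      simp [natOfBits, List.range, List.range.loop, List.find?] <;>
      first
        | exact (congrFun quarterB_zero t).symm
        | exact (congrFun quarterB_one t).symm
        | exact (congrFun quarterB_two t).symm
        | exact (congrFun quarterB_three t).symm
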